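-- pv_equiv track=rewrite | github.com/pietrushka/advent-of-code | 2024/day9/2.py | find_gap
-- ===== SOURCE A (Python) =====
-- def find_gap(disk, size, rightIdx):
--     gap_start_idx = None
--
--     for idx in range(0, rightIdx):
--         if disk[idx] != ".":
--             if gap_start_idx is not None:
--                 gap_start_idx = None
--
--         if disk[idx] == ".":
--             if gap_start_idx is None:
--                 gap_start_idx = idx
--
--             if idx - gap_start_idx == size - 1:
--                 return gap_start_idx
-- ===== SOURCE B (Python) =====
-- def find_gap(disk, size, rightIdx):
--     # Leftmost run of '.'-cells of the given length via substring search.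
--     s = ''.join('.' if x == '.' else 'x' for x in disk[:max(rightIdx, 0)])
--     if not (0 < size <= len(s)):
--         return None
--     i = s.find('.' * size)
--     return None if i == -1 else i
-- ===== Notes on version B (the rewrite author's own statement) =====
-- stated objective: idiomatic
-- what changed: Replaces the explicit run-tracking state machine over indices with mapping the prefix to a '.'/'x' character string and one leftmost substring search s.find('.'*size), with -1 mapped to None and a natural guard 0 < size <= len(s).
-- outside the precondition, e.g. on find_gap(['.'], 1, 5): A returns 0, B returns 0
import Mathlib
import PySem

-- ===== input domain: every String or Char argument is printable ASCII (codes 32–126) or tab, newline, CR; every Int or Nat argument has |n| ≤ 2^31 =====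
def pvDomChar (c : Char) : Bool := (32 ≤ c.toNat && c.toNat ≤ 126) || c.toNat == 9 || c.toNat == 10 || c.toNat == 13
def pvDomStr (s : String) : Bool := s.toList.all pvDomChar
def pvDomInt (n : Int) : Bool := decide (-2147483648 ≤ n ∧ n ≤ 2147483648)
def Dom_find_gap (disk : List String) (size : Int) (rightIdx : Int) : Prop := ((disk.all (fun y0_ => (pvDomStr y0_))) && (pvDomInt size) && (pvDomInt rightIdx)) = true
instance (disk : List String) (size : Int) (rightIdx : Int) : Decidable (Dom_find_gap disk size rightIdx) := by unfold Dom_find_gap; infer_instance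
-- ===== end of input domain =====

-- B replaces A's run-tracking state machine with one leftmost substring search on a '.'/'x' image of the prefix (idiomatic, same cost).

-- ===== PORT A =====
-- A's for-loop with its early return, as structural recursion over the index list
def find_gap_go (disk : List String) (size : Int) : List Int → Option Int → Option Int
  | [], _ => none
  | idx :: rest, gap =>
    match PySem.List.pyGet? disk idx with
    | none => none
    | some c =>
      let gap1 := if c ≠ "." then (if gap.isSome then none else gap) else gap
      if c = "." then
        let gap2 := if gap1.isNone then some idx else gap1
        match gap2 with
        | some g => if idx - g = size - 1 then some g else find_gap_go disk size rest gap2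
        | none => find_gap_go disk size rest gap2
      else
        find_gap_go disk size rest gap1

def find_gap (disk : List String) (size : Int) (rightIdx : Int) : Option Int :=
  find_gap_go disk size (PySem.List.pyRange 0 rightIdx 1) none

-- ===== PORT B =====
-- ''.join of one-char images is ported exactly as the corresponding List Char (PySem.Chars domain);
-- s.find is PySem.Chars.find, '.'*size is List.replicate.
def find_gap_alt (disk : List String) (size : Int) (rightIdx : Int) : Option Int :=
  let s : List Char :=
    (PySem.List.slice disk none (some (max rightIdx 0))).map (fun x => if x = "." then '.' else 'x')
  if 0 < size ∧ size ≤ (s.length : Int) then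
    let i := PySem.Chars.find s (List.replicate size.toNat '.')
    if i = -1 then none else some i
  else none

-- ===== PRECONDITION & SPEC =====
-- Pre_ excludes rightIdx > len(disk): there A's loop raises IndexError unless a gap of the given
-- size is found before the scan leaves the list (e.g. (['.'], 1, 5): A returns 0 — excluded).
def Pre_find_gap (disk : List String) (size : Int) (rightIdx : Int) : Prop :=
  rightIdx ≤ (disk.length : Int)
instance (disk : List String) (size : Int) (rightIdx : Int) : Decidable (Pre_find_gap disk size rightIdx) := by unfold Pre_find_gap; infer_instance

def pvWitness_find_gap : List String × Int × Int := (["x", ".", ".", "x"], 2, 4)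

def Spec_find_gap (disk : List String) (size : Int) (rightIdx : Int) (out : Option Int) : Prop := out = find_gap_alt disk size rightIdx
instance (disk : List String) (size : Int) (rightIdx : Int) (out : Option Int) : Decidable (Spec_find_gap disk size rightIdx out) := by unfold Spec_find_gap; infer_instance

-- ===== CLAIM (what is proved, stated in full; the proofs are below) =====
def Claim_equal_find_gap : Prop := ∀ (disk : List String) (size : Int) (rightIdx : Int), Dom_find_gap disk size rightIdx → Pre_find_gap disk size rightIdx → Spec_find_gap disk size rightIdx (find_gap disk size rightIdx)

-- ===== LEMMAS AND PROOFS =====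

lemma pv_find_none (l pat : List Char) (h : ∀ i, ¬ pat <+: l.drop i) :
    PySem.Chars.find l pat = -1 := by
  rw [PySem.Chars.find_eq_neg_one_iff]
  intro hinf
  have : PySem.Chars.isIn pat l = true := (PySem.Chars.isIn_iff_infix pat l).mpr hinf
  obtain ⟨j, hj⟩ := (PySem.Chars.exists_prefix_drop_iff_isIn pat l).mpr this
  exact h j hj

lemma pv_find_at (l pat : List Char) (rs : Nat) (h1 : pat <+: l.drop rs)
    (h2 : ∀ i, i < rs → ¬ pat <+: l.drop i) :
    PySem.Chars.find l pat = (rs : Int) := by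
  have hinf : pat <:+: l := by
    have : PySem.Chars.isIn pat l = true :=
      (PySem.Chars.exists_prefix_drop_iff_isIn pat l).mp ⟨rs, h1⟩
    exact (PySem.Chars.isIn_iff_infix pat l).mp this
  have hnn : 0 ≤ PySem.Chars.find l pat := (PySem.Chars.find_nonneg_iff l pat).mpr hinf
  obtain ⟨hpre, hmin⟩ := PySem.Chars.find_spec hnn
  have h1' : (PySem.Chars.find l pat).toNat = rs := by
    rcases Nat.lt_trichotomy (PySem.Chars.find l pat).toNat rs with h | h | h
    · exact absurd hpre (h2 _ h)
    · exact h
    · exact absurd h1 (hmin rs h)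
  omega

lemma prefix_getElem? {l1 l2 : List Char} (h : l1 <+: l2) {i : Nat} (hi : i < l1.length) :
    l2[i]? = l1[i]? := by
  obtain ⟨t, rfl⟩ := h
  rw [List.getElem?_append_left hi]

lemma replicate_prefix_drop_iff (l : List Char) (k i : Nat) (hk : 0 < k) :
    List.replicate k '.' <+: l.drop i ↔ i + k ≤ l.length ∧ ∀ j, i ≤ j → j < i + k → l[j]? = some '.' := by
  constructor
  · intro h
    have hlen := h.length_le
    simp [List.length_drop] at hlen
    refine ⟨by omega, ?_⟩
    intro j hij hjk
    have hj : j - i < k := by omega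
    have := prefix_getElem? h (i := j - i) (by simpa using hj)
    rw [List.getElem?_replicate, if_pos hj, List.getElem?_drop] at this
    rw [show i + (j - i) = j by omega] at this
    exact this
  · rintro ⟨hle, hall⟩
    rw [List.prefix_iff_eq_take]
    apply List.ext_getElem?
    intro j
    rw [List.length_replicate, List.getElem?_replicate, List.getElem?_take]
    by_cases hj : j < k
    · rw [if_pos hj, if_pos hj, List.getElem?_drop]
      exact (hall (i + j) (by omega) (by omega)).symm
    · rw [if_neg hj, if_neg hj]

lemma go_nonpos (disk : List String) (size : Int) (hs : size ≤ 0) :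
    ∀ m (a b : Int) (g? : Option Int), (b - a).toNat = m → (∀ g, g? = some g → g ≤ a) →
      find_gap_go disk size (PySem.List.pyRange a b 1) g? = none := by
  intro m
  induction m with
  | zero =>
    intro a b g? hm _
    rw [PySem.List.pyRange_one_eq_nil (by omega)]
    rfl
  | succ m ih =>
    intro a b g? hm hg
    rw [PySem.List.pyRange_one_cons (by omega)]
    cases hget : PySem.List.pyGet? disk a with
    | none => simp [find_gap_go, hget]
    | some c =>
      by_cases hc : c = "."
      · cases g? with
        | none =>
          simp [find_gap_go, hget, hc]
          rw [if_neg (by omega : ¬(0 : Int) = size - 1)]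
          exact ih (a + 1) b (some a) (by omega) (by intro g hgg; injection hgg with h; omega)
        | some g =>
          have hga : g ≤ a := hg g rfl
          have hne : ¬(a - g = size - 1) := by omega
          simp [find_gap_go, hget, hc, hne]
          exact ih (a + 1) b (some g) (by omega) (by intro g' hgg; injection hgg with h; omega)
      · have h1 : (if g?.isSome then none else g?) = (none : Option Int) := by
          cases g? <;> simp
        simp [find_gap_go, hget, hc, h1]
        exact ih (a + 1) b none (by omega) (by intro g hgg; cases hgg)

lemma go_inv (disk : List String) (size : Int) (hk : 0 < size) (n : Nat)
    (hn : n ≤ disk.length)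
    (l : List Char) (hl : l = (disk.take n).map (fun x => if x = "." then '.' else 'x')) :
    ∀ cnt (idx rs : Nat), idx + cnt = n → rs ≤ idx →
      (∀ j, rs ≤ j → j < idx → l[j]? = some '.') →
      ((idx : Int) - rs < size) →
      (∀ i, i < rs → ¬ (List.replicate size.toNat '.' <+: l.drop i)) →
      find_gap_go disk size (PySem.List.pyRange (idx : Int) (n : Int) 1)
          (if rs = idx then none else some (rs : Int)) =
        (if PySem.Chars.find l (List.replicate size.toNat '.') = -1 then none
         else some (PySem.Chars.find l (List.replicate size.toNat '.'))) := by
  have hkn : 0 < size.toNat := by omega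
  have hln : l.length = n := by
    rw [hl]; simp [List.length_take]; omega
  have hli : ∀ j (hj : j < n), l[j]? = some (if disk[j]'(Nat.lt_of_lt_of_le hj hn) = "." then '.' else 'x') := by
    intro j hj
    rw [hl, List.getElem?_map, List.getElem?_take, if_pos hj,
      List.getElem?_eq_getElem (Nat.lt_of_lt_of_le hj hn)]
    rfl
  intro cnt
  induction cnt with
  | zero =>
    intro idx rs hcnt hrs h2 h3 h4
    have hidx : idx = n := by omega
    rw [PySem.List.pyRange_one_eq_nil (by omega)]
    have hfind : PySem.Chars.find l (List.replicate size.toNat '.') = -1 := by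
      apply pv_find_none
      intro i hi
      have hi' := (replicate_prefix_drop_iff l _ i hkn).mp hi
      obtain ⟨hile, -⟩ := hi'
      rw [hln] at hile
      by_cases hirs : i < rs
      · exact h4 i hirs hi
      · omega
    rw [if_pos hfind]
    rfl
  | succ cnt ih =>
    intro idx rs hcnt hrs h2 h3 h4
    have hidxn : idx < n := by omega
    rw [PySem.List.pyRange_one_cons (by omega)]
    have hget : PySem.List.pyGet? disk (idx : Int) = some (disk[idx]'(Nat.lt_of_lt_of_le hidxn hn)) := by
      rw [PySem.List.pyGet?_natCast]
      exact List.getElem?_eq_getElem (Nat.lt_of_lt_of_le hidxn hn)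
    by_cases hc : disk[idx]'(Nat.lt_of_lt_of_le hidxn hn) = "."
    · have hdot : l[idx]? = some '.' := by rw [hli idx hidxn, if_pos hc]
      by_cases hret : (idx : Int) - rs = size - 1
      · -- A returns rs; it is the leftmost run start
        have hrun : List.replicate size.toNat '.' <+: l.drop rs := by
          rw [replicate_prefix_drop_iff l _ rs hkn]
          refine ⟨by omega, ?_⟩
          intro j hj1 hj2
          by_cases hji : j < idx
          · exact h2 j hj1 hji
          · have : j = idx := by omega
            rw [this]; exact hdot
        have hfind := pv_find_at l (List.replicate size.toNat '.') rs hrun h4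
        have hstep : find_gap_go disk size ((idx : Int) :: PySem.List.pyRange ((idx : Int) + 1) (n : Int) 1)
            (if rs = idx then none else some (rs : Int)) = some (rs : Int) := by
          by_cases hrsidx : rs = idx
          · subst hrsidx
            have hret0 : (0 : Int) = size - 1 := by omega
            simp [find_gap_go, hget, hc, ← hret0]
          · rw [if_neg hrsidx]
            simp [find_gap_go, hget, hc, hret]
        rw [hstep, hfind, if_neg (by omega : ¬ ((rs : Nat) : Int) = -1)]
      · -- no return yet: extend the run
        have hstep : find_gap_go disk size ((idx : Int) :: PySem.List.pyRange ((idx : Int) + 1) (n : Int) 1)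
            (if rs = idx then none else some (rs : Int)) =
            find_gap_go disk size (PySem.List.pyRange ((idx : Int) + 1) (n : Int) 1) (some (rs : Int)) := by
          by_cases hrsidx : rs = idx
          · subst hrsidx
            have hret0 : ¬ (0 : Int) = size - 1 := by omega
            simp [find_gap_go, hget, hc, hret0]
          · rw [if_neg hrsidx]
            simp [find_gap_go, hget, hc, hret]
        rw [hstep]
        have := ih (idx + 1) rs (by omega) (by omega)
          (by intro j hj1 hj2
              by_cases hji : j < idx
              · exact h2 j hj1 hji
              · have : j = idx := by omega
                rw [this]; exact hdot)
          (by omega) h4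
        rw [if_neg (by omega : ¬ rs = idx + 1)] at this
        rw [show ((idx : Int) + 1) = ((idx + 1 : Nat) : Int) by push_cast; ring]
        exact this
    · -- non-dot: reset the run
      have hx : l[idx]? = some 'x' := by rw [hli idx hidxn, if_neg hc]
      have hstep : find_gap_go disk size ((idx : Int) :: PySem.List.pyRange ((idx : Int) + 1) (n : Int) 1)
          (if rs = idx then none else some (rs : Int)) =
          find_gap_go disk size (PySem.List.pyRange ((idx : Int) + 1) (n : Int) 1) none := by
        by_cases hrsidx : rs = idx
        · rw [if_pos hrsidx]; simp [find_gap_go, hget, hc]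
        · rw [if_neg hrsidx]; simp [find_gap_go, hget, hc]
      rw [hstep]
      have h4' : ∀ i, i < idx + 1 → ¬ (List.replicate size.toNat '.' <+: l.drop i) := by
        intro i hi hpre
        by_cases hirs : i < rs
        · exact h4 i hirs hpre
        · have hpre' := (replicate_prefix_drop_iff l _ i hkn).mp hpre
          obtain ⟨hile, hall⟩ := hpre'
          have := hall idx (by omega) (by omega)
          rw [hx] at this
          simp at this
      have := ih (idx + 1) (idx + 1) (by omega) (by omega)
        (by intro j hj1 hj2; omega) (by omega) h4'
      rw [if_pos rfl] at this
      rw [show ((idx : Int) + 1) = ((idx + 1 : Nat) : Int) by push_cast; ring]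
      exact this

theorem find_gap_eq_alt (disk : List String) (size : Int) (rightIdx : Int)
    (hpre : rightIdx ≤ (disk.length : Int)) :
    find_gap disk size rightIdx = find_gap_alt disk size rightIdx := by
  by_cases hneg : rightIdx ≤ 0
  · have hA : find_gap disk size rightIdx = none := by
      unfold find_gap
      rw [PySem.List.pyRange_one_eq_nil (by omega)]
      rfl
    have hmax : max rightIdx 0 = 0 := max_eq_right hneg
    have hB : find_gap_alt disk size rightIdx = none := by
      unfold find_gap_alt
      rw [hmax, PySem.List.slice_to disk (by omega)]
      simp
    rw [hA, hB]
  · have hr0 : 0 ≤ rightIdx := by omega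
    set n := rightIdx.toNat with hn_def
    have hr : (n : Int) = rightIdx := Int.toNat_of_nonneg hr0
    have hn : n ≤ disk.length := by omega
    set l : List Char := (disk.take n).map (fun x => if x = "." then '.' else 'x') with hl_def
    have hmax : max rightIdx 0 = rightIdx := max_eq_left hr0
    have hslice : PySem.List.slice disk none (some (max rightIdx 0)) = disk.take n := by
      rw [hmax, PySem.List.slice_to disk hr0]
    have hln : l.length = n := by
      rw [hl_def]; simp [List.length_take]; omega
    have hBs : find_gap_alt disk size rightIdx =
        (if 0 < size ∧ size ≤ (n : Int) then
          (if PySem.Chars.find l (List.replicate size.toNat '.') = -1 then none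
           else some (PySem.Chars.find l (List.replicate size.toNat '.')))
         else none) := by
      unfold find_gap_alt
      rw [hslice, ← hl_def]
      show (if 0 < size ∧ size ≤ (l.length : Int) then
          (if PySem.Chars.find l (List.replicate size.toNat '.') = -1 then none
           else some (PySem.Chars.find l (List.replicate size.toNat '.'))) else none) = _
      rw [hln]
    by_cases hs : 0 < size ∧ size ≤ (n : Int)
    · have hA := go_inv disk size hs.1 n hn l hl_def n 0 0 (by omega) (by omega)
        (by intro j h1 h2; omega) (by omega) (by intro i hi; omega)
      rw [if_pos rfl] at hA
      simp only [Nat.cast_zero] at hA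
      rw [hBs, if_pos hs]
      unfold find_gap
      rw [← hr]
      exact hA
    · rw [hBs, if_neg hs]
      by_cases hsz : size ≤ 0
      · unfold find_gap
        exact go_nonpos disk size hsz (rightIdx - 0).toNat 0 rightIdx none rfl
          (by intro g hg; cases hg)
      · -- 0 < size but size > n: no run fits
        have hk : 0 < size := by omega
        have hbig : (n : Int) < size := by
          rcases lt_or_ge (n : Int) size with h | h
          · exact h
          · exact absurd ⟨hk, h⟩ hs
        have hA := go_inv disk size hk n hn l hl_def n 0 0 (by omega) (by omega)
          (by intro j h1 h2; omega) (by omega) (by intro i hi; omega)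
        rw [if_pos rfl] at hA
        simp only [Nat.cast_zero] at hA
        have hfind : PySem.Chars.find l (List.replicate size.toNat '.') = -1 := by
          apply pv_find_none
          intro i hpre'
          have := hpre'.length_le
          simp [List.length_drop, hln] at this
          omega
        rw [hfind, if_pos rfl] at hA
        unfold find_gap
        rw [← hr]
        exact hA

-- ===== VERDICT (by name: the statement is the Claim_ definition above) =====
theorem find_gap_spec : Claim_equal_find_gap := by
  intro disk size rightIdx _ hpre
  exact find_gap_eq_alt disk size rightIdx hpre
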